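-- pv_equiv track=rewrite | github.com/liuyubiao/test_1 | category/category_299.py | single_remove_format
-- ===== SOURCE A (Python) =====
-- def remove_contain_str(input_list):
--     '''
--     去除列表中被其他元素包含的元素
--     :param input_list:
--     :return:
--     '''
--     src_list = input_list
--     # 为了保证各个属性输出时的准确性，现在会对属性结果进行排序处理
--     input_list.sort(key=len, reverse=True)
--     tmp_out, filter_list = [], []
--     for s in input_list:
--         mask_list = [s in o for o in tmp_out]
--         if not any(mask_list):  # any函数全部为false才返回false
--             tmp_out.append(s)
--         else:
--             # 记录是因为那个元素的存在导致被过滤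
--             filter_list.append(s)
--
--     # 对out进行排序
--     out = [item for item in src_list if item in tmp_out]
--     return out, filter_list
--
-- def single_remove_format(result_data_list):
--     '''
--     对单list集合去重格式化
--     :param result_data_list:
--     :return:
--     '''
--     result_data_list = [item.strip() for item in result_data_list if len(item) > 1]
--     # 先按照出现次数排序之后再进行去重
--     result_data_list = sorted(result_data_list, key=lambda x: result_data_list.count(x), reverse=True)
--     # 这种去重方式会打乱顺序
--     # tmp_data_list = list(set(result_data_list))
--     tmp_data_list = sorted(set(result_data_list), key=result_data_list.index)
--
--     if tmp_data_list == None or len(tmp_data_list) == 0: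
--         tmp_data_list = []
--     else:
--         # 针对包含的内容再进行细分，包含情况也需要排除
--         tmp_data_list, _ = remove_contain_str(tmp_data_list)
--     return tmp_data_list
-- ===== SOURCE B (Python) =====
-- def single_remove_format(result_data_list):
--     cleaned = [item.strip() for item in result_data_list if len(item) > 1]
--     counts = {}
--     for s in cleaned:
--         counts[s] = counts.get(s, 0) + 1
--     by_count = sorted(cleaned, key=lambda s: counts[s], reverse=True)
--     ordered = sorted(dict.fromkeys(by_count), key=len, reverse=True)
--     return [x for x in ordered if not any(x != y and x in y for y in ordered)]
-- ===== Notes on version B (the rewrite author's own statement) =====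
-- stated objective: faster
-- what changed: B replaces A's quadratic sort key (list.count called per element) and sorted(set, key=list.index) dedup with a single counting-dict pass plus dict.fromkeys, and replaces the incremental length-sorted kept-list substring removal (plus the rebuild filter pass) with one order-independent all-pairs containment filter.
import Mathlib
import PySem

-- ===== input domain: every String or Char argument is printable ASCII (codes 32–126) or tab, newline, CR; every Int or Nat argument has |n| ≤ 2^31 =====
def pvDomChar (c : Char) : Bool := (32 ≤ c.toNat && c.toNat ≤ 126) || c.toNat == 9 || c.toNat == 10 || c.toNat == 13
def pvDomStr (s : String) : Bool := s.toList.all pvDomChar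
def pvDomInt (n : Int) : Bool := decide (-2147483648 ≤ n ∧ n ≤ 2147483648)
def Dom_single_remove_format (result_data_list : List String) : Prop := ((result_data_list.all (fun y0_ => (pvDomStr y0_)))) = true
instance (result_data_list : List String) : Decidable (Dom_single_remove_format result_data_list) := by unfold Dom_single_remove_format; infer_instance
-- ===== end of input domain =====

-- B replaces A's O(n)-per-comparison .count sort key and sorted(set, key=.index) dedup by a
-- counting dict + dict.fromkeys, and the incremental kept-list substring removal by an
-- order-independent all-pairs filter; return value only (A never mutates its argument).

-- ===== PORT A =====
-- helper: remove_contain_str; input_list.sort(...) mutates in place, so src_list (an alias)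
-- is the length-sorted list when `out` is built.
def remove_contain_str (input_list : List String) : List String × List String :=
  let src_list := PySem.List.sorted input_list (fun s => PySem.Str.len s) true
  let st := src_list.foldl (fun (acc : List String × List String) s =>
      let mask_list := acc.1.map (fun o => PySem.Str.isIn s o)
      if !(mask_list.any (fun b => b)) then (acc.1 ++ [s], acc.2) else (acc.1, acc.2 ++ [s]))
    ([], [])
  let out := src_list.filter (fun item => decide (item ∈ st.1))
  (out, st.2)

def single_remove_format (result_data_list : List String) : List String :=
  let cleaned := (result_data_list.filter (fun item => decide ((1:Int) < PySem.Str.len item))).map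
    (fun item => PySem.Str.strip item)
  let sortedC := PySem.List.sorted cleaned (fun x => (cleaned.count x : Int)) true
  -- sorted(set(sortedC), key=sortedC.index): .index never raises here (every set element
  -- occurs in sortedC), so List.idxOf is exact
  let tmp := PySem.List.sorted (PySem.Set.ofList sortedC) (fun x => (sortedC.idxOf x : Int))
  if tmp.length = 0 then [] else (remove_contain_str tmp).1

-- ===== PORT B =====
def single_remove_format_alt (result_data_list : List String) : List String :=
  let cleaned := (result_data_list.filter (fun item => decide ((1:Int) < PySem.Str.len item))).map
    (fun item => PySem.Str.strip item)
  let counts := cleaned.foldl (fun d s => d.insert s (d.getD s 0 + 1))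
    (PySem.Dict.empty : PySem.Dict String Int)
  let by_count := PySem.List.sorted cleaned (fun s => counts.getD s 0) true
  let ordered := PySem.List.sorted (PySem.List.dedup by_count) (fun s => PySem.Str.len s) true
  ordered.filter (fun x => !(ordered.any (fun y => decide (x ≠ y) && PySem.Str.isIn x y)))

-- ===== PRECONDITION & SPEC =====
def Spec_single_remove_format (result_data_list : List String) (out : List String) : Prop := out = single_remove_format_alt result_data_list
instance (result_data_list : List String) (out : List String) : Decidable (Spec_single_remove_format result_data_list out) := by unfold Spec_single_remove_format; infer_instance

-- ===== CLAIM (what is proved, stated in full; the proofs are below) =====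
def Claim_equal_single_remove_format : Prop := ∀ (result_data_list : List String), Dom_single_remove_format result_data_list → Spec_single_remove_format result_data_list (single_remove_format result_data_list)

-- ===== LEMMAS AND PROOFS =====

def pvKeep (L : List String) (x : String) : Bool :=
  !(L.any (fun y => decide (x ≠ y) && PySem.Str.isIn x y))

lemma exists_maxlen (T : List String) (h : T ≠ []) :
    ∃ z ∈ T, ∀ w ∈ T, w.toList.length ≤ z.toList.length := by
  induction T with
  | nil => simp at h
  | cons a t ih =>
    rcases eq_or_ne t [] with rfl | ht
    · exact ⟨a, by simp, by simp⟩
    · obtain ⟨z, hz, hmax⟩ := ih ht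
      rcases Nat.le_total z.toList.length a.toList.length with hle | hlt
      · exact ⟨a, by simp, by
          intro w hw
          rcases List.mem_cons.1 hw with rfl | hw
          · exact le_rfl
          · exact (hmax w hw).trans hle⟩
      · exact ⟨z, List.mem_cons_of_mem _ hz, by
          intro w hw
          rcases List.mem_cons.1 hw with rfl | hw
          · exact hlt
          · exact hmax w hw⟩

lemma mask_eq_keep (L : List String) (hnd : L.Nodup)
    (hp : L.Pairwise (fun a b => PySem.Str.len b ≤ PySem.Str.len a))
    (pre : List String) (s : String) (rest : List String) (hL : L = pre ++ s :: rest) :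
    ((pre.filter (pvKeep L)).any (fun o => PySem.Str.isIn s o)) = !(pvKeep L s) := by
  have hlen : ∀ a b : String, PySem.Str.len a ≤ PySem.Str.len b ↔ a.toList.length ≤ b.toList.length := by
    intro a b; rw [PySem.Str.len_eq, PySem.Str.len_eq]; exact_mod_cast Iff.rfl
  have hsne : s ∉ pre := by
    rw [hL, List.nodup_append] at hnd
    exact fun hs => hnd.2.2 s hs s List.mem_cons_self rfl
  have hrest : ∀ b ∈ rest, b.toList.length ≤ s.toList.length := by
    rw [hL, List.pairwise_append] at hp
    intro b hb
    exact (hlen b s).1 ((List.pairwise_cons.1 hp.2.1).1 b hb)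
  rw [pvKeep, Bool.not_not, Bool.eq_iff_iff]
  simp only [List.any_eq_true, List.mem_filter, decide_eq_true_eq, Bool.and_eq_true,
    PySem.Str.isIn_iff_infix, ne_eq]
  constructor
  · rintro ⟨o, ⟨ho, hko⟩, hinf⟩
    refine ⟨o, by rw [hL]; exact List.mem_append_left _ ho, ?_, hinf⟩
    exact fun h => hsne (h ▸ ho)
  · rintro ⟨y, hy, hys, hinf⟩
    -- take a maximal-length container z of s
    set T := L.filter (fun y => decide (s ≠ y) && PySem.Str.isIn s y) with hT
    have hyT : y ∈ T := by
      rw [hT]; simp only [List.mem_filter, Bool.and_eq_true, decide_eq_true_eq,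
        PySem.Str.isIn_iff_infix]
      exact ⟨hy, hys, hinf⟩
    obtain ⟨z, hzT, hzmax⟩ := exists_maxlen T (List.ne_nil_of_mem hyT)
    have hzT' := hzT
    rw [hT, List.mem_filter] at hzT'
    simp only [Bool.and_eq_true, decide_eq_true_eq, PySem.Str.isIn_iff_infix] at hzT'
    obtain ⟨hzL, hzs, hzinf⟩ := hzT'
    -- s is strictly shorter than z
    have hslt : s.toList.length < z.toList.length := by
      rcases Nat.lt_or_ge s.toList.length z.toList.length with h | h
      · exact h
      · exact absurd (String.toList_inj.1 (hzinf.eq_of_length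
          (Nat.le_antisymm hzinf.length_le h))) hzs
    -- z is kept by the all-pairs filter
    have hkz : pvKeep L z = true := by
      rw [pvKeep, Bool.not_eq_true', List.any_eq_false]
      intro w hw
      rw [Bool.not_eq_true, Bool.and_eq_false_iff]
      by_cases hzw : z = w
      · left; simp [hzw]
      · by_cases hinf2 : z.toList <:+: w.toList
        · exfalso
          have hsw : s.toList <:+: w.toList := hzinf.trans hinf2
          have h2 := hinf2.length_le
          have hswne : s ≠ w := by
            intro h; rw [← h] at h2; omega
          have hwT : w ∈ T := by
            rw [hT, List.mem_filter]
            simp only [Bool.and_eq_true, decide_eq_true_eq, PySem.Str.isIn_iff_infix, ne_eq]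
            exact ⟨hw, hswne, hsw⟩
          have h1 := hzmax w hwT
          exact hzw (String.toList_inj.1 (hinf2.eq_of_length (Nat.le_antisymm h2 h1)))
        · right
          by_contra hne
          rw [Bool.not_eq_false, PySem.Str.isIn_iff_infix] at hne
          exact hinf2 hne
    -- z lies in pre
    have hzpre : z ∈ pre := by
      rw [hL] at hzL
      rcases List.mem_append.1 hzL with h | h
      · exact h
      · rcases List.mem_cons.1 h with rfl | h
        · exact absurd rfl hzs
        · exact absurd (hrest z h) (by omega)
    exact ⟨z, ⟨hzpre, hkz⟩, hzinf⟩

lemma fold_keep (L : List String) (hnd : L.Nodup)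
    (hp : L.Pairwise (fun a b => PySem.Str.len b ≤ PySem.Str.len a)) :
    ∀ (rest pre fl : List String), L = pre ++ rest →
    ((rest.foldl (fun (acc : List String × List String) s =>
        let mask_list := acc.1.map (fun o => PySem.Str.isIn s o)
        if !(mask_list.any (fun b => b)) then (acc.1 ++ [s], acc.2) else (acc.1, acc.2 ++ [s]))
      (pre.filter (pvKeep L), fl)).1) = L.filter (pvKeep L) := by
  intro rest
  induction rest with
  | nil => intro pre fl hL; simp at hL; rw [List.foldl_nil, hL]
  | cons s rest' ih =>
    intro pre fl hL
    rw [List.foldl_cons]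
    have hmask : ((pre.filter (pvKeep L)).map (fun o => PySem.Str.isIn s o)).any (fun b => b)
        = !(pvKeep L s) := by
      rw [List.any_map]
      exact mask_eq_keep L hnd hp pre s rest' hL
    by_cases hks : pvKeep L s = true
    · simp only [hmask, hks, Bool.not_true, Bool.not_false, if_pos]
      have : pre.filter (pvKeep L) ++ [s] = (pre ++ [s]).filter (pvKeep L) := by
        rw [List.filter_append]; simp [hks]
      rw [this]
      exact ih (pre ++ [s]) fl (by rw [hL]; simp)
    · rw [Bool.not_eq_true] at hks
      simp only [hmask, hks, Bool.not_false, Bool.not_true, if_neg, Bool.false_eq_true,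
        not_false_iff]
      have : pre.filter (pvKeep L) = (pre ++ [s]).filter (pvKeep L) := by
        rw [List.filter_append]; simp [hks]
      rw [this]
      exact ih (pre ++ [s]) (fl ++ [s]) (by rw [hL]; simp)

lemma remove_contain_str_eq (D : List String) (hnd : D.Nodup) :
    (remove_contain_str D).1
      = (PySem.List.sorted D (fun s => PySem.Str.len s) true).filter
          (pvKeep (PySem.List.sorted D (fun s => PySem.Str.len s) true)) := by
  set L := PySem.List.sorted D (fun s => PySem.Str.len s) true with hLdef
  have hndL : L.Nodup := ((PySem.List.sorted_perm D (fun s => PySem.Str.len s) true).nodup_iff).2 hnd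
  have hpL : L.Pairwise (fun a b => PySem.Str.len b ≤ PySem.Str.len a) :=
    PySem.List.sorted_pairwise_rev D (fun s => PySem.Str.len s)
  have hfold := fold_keep L hndL hpL L [] [] (by simp)
  simp only [List.filter_nil] at hfold
  show (let st := L.foldl _ ([], []); let out := L.filter (fun item => decide (item ∈ st.1)); (out, st.2)).1
    = L.filter (pvKeep L)
  simp only []
  rw [hfold]
  refine List.filter_congr ?_
  intro item hitem
  simp [List.mem_filter, hitem]

lemma counts_getD (l : List String) (v : String) :
    ((l.foldl (fun d s => d.insert s (d.getD s 0 + 1)) (PySem.Dict.empty : PySem.Dict String Int)).getD v 0)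
      = (l.count v : Int) := by
  rw [PySem.Dict.getD_foldl_insert_add_one]
  simp [PySem.Dict.empty, PySem.Dict.getD, PySem.Dict.get?]

lemma ofList_pairwise_idxOf (S : List String) :
    (PySem.Set.ofList S).Pairwise (fun a b => (S.idxOf a : Int) ≤ (S.idxOf b : Int)) := by
  induction S using List.reverseRecOn with
  | nil => simp [PySem.Set.ofList, PySem.Set.empty]
  | append_singleton T x ih =>
    have hsub : ∀ a, a ∈ PySem.Set.ofList T → a ∈ T := fun a ha => (PySem.Set.mem_ofList T a).1 ha
    have hfold : PySem.Set.ofList (T ++ [x]) = PySem.Set.add (PySem.Set.ofList T) x := by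
      simp [PySem.Set.ofList, List.foldl_append]
    have hT : (PySem.Set.ofList T).Pairwise
        (fun a b => ((T ++ [x]).idxOf a : Int) ≤ ((T ++ [x]).idxOf b : Int)) := by
      refine List.Pairwise.imp_of_mem ?_ ih
      intro a b ha hb h
      rw [List.idxOf_append_of_mem (hsub a ha), List.idxOf_append_of_mem (hsub b hb)]
      exact h
    by_cases hx : x ∈ T
    · have hadd : PySem.Set.add (PySem.Set.ofList T) x = PySem.Set.ofList T := by
        simp [PySem.Set.add, PySem.Set.contains, (PySem.Set.mem_ofList T x).2 hx]
      rw [hfold, hadd]; exact hT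
    · have hadd : PySem.Set.add (PySem.Set.ofList T) x = PySem.Set.ofList T ++ [x] := by
        have : x ∉ PySem.Set.ofList T := fun h => hx (hsub x h)
        simp [PySem.Set.add, PySem.Set.contains, this]
      rw [hfold, hadd, List.pairwise_append]
      refine ⟨hT, by simp, ?_⟩
      intro a ha b hb
      rcases List.mem_singleton.1 hb with rfl
      rw [List.idxOf_append_of_mem (hsub a ha), List.idxOf_append, if_neg hx]
      have h1 : T.idxOf a < T.length := List.idxOf_lt_length_of_mem (hsub a ha)
      simp
      omega

lemma sorted_idx_ofList (S : List String) :
    PySem.List.sorted (PySem.Set.ofList S) (fun x => (S.idxOf x : Int)) = PySem.Set.ofList S :=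
  PySem.List.sorted_eq_self_of_pairwise _ _ (ofList_pairwise_idxOf S)

-- ===== VERDICT (by name: the statement is the Claim_ definition above) =====
theorem single_remove_format_spec : Claim_equal_single_remove_format := by
  intro rdl _
  unfold Spec_single_remove_format
  simp only [single_remove_format, single_remove_format_alt, counts_getD,
    PySem.List.dedup_eq_ofList, sorted_idx_ofList]
  generalize (PySem.List.sorted
    ((rdl.filter (fun item => decide ((1:Int) < PySem.Str.len item))).map (fun item => PySem.Str.strip item))
    (fun x => (List.count x ((rdl.filter (fun item => decide ((1:Int) < PySem.Str.len item))).map (fun item => PySem.Str.strip item)) : Int)) true) = S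
  have hnd : (PySem.Set.ofList S).Nodup := PySem.Set.nodup_ofList S
  generalize hDS : PySem.Set.ofList S = D at hnd
  by_cases hD : D = []
  · subst hD
    rw [(PySem.List.sorted_eq_nil_iff ([] : List String) (fun s => PySem.Str.len s) true).mpr rfl]
    simp
  · rw [if_neg (by simpa using hD), remove_contain_str_eq D hnd]
    refine List.filter_congr ?_
    intro x hx
    simp [pvKeep]
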